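-- pv_equiv track=rewrite | github.com/p0l4ris06/Obsidian-Vault-Reconstruct-Zettelkasten | add_frontmatter.py | transform_tags
-- ===== SOURCE A (Python) =====
-- from typing import List, Set, Tuple
--
-- BODY_SYSTEMS = {
--     "alimentary", "digestion", "digestive", "gi", "gastrointestinal",
--     "renal", "kidney", "urinary", "bladder",
--     "respiratory", "respiration",
--     "cardiovascular", "cardiology", "cardiac",
--     "endocrine", "hormones",
--     "neurology", "neuroscience", "nervous",
--     "reproduction", "embryology", "reproductive",
--     "musculoskeletal", "orthopaedics", "orthopaedic", "skeletal", "muscular",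
--     "haematology", "blood",
--     "microbiology", "microbes",
--     "integumentary", "skin",
--     "sensory", "eyes", "ears",
-- }
--
-- SPECIES = {
--     "canine", "dog", "dogs",
--     "feline", "cat", "cats",
--     "equine", "horse", "horses",
--     "bovine", "cow", "cattle",
--     "ovine", "sheep",
--     "porcine", "pig",
--     "rabbit", "lagomorph",
--     "reptile", "snake", "lizard", "tortoise",
--     "avian", "bird", "birds",
--     "exotics", "smallies",
-- }
--
-- CORE_SUBJECTS = {
--     "anatomy", "physiology", "pathology", "pharmacology",
--     "clinical", "theory", "surgery", "anaesthesia",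
--     "nursing", "emergency", "diagnostics",
-- }
--
-- def transform_tags(tags: Set[str]) -> List[str]:
--     """
--     Transforms and sorts tags with an explicit hierarchical structure for anatomy:
--     anatomy/body-system/cardiac
--     Then adds core subjects, species, and other tags.
--     """
--     systems = sorted([t for t in tags if t in BODY_SYSTEMS])
--     species = sorted([t for t in tags if t in SPECIES])
--     core = sorted([t for t in tags if t in CORE_SUBJECTS and t != "anatomy"])
--     others = sorted([t for t in tags if t not in BODY_SYSTEMS and t not in SPECIES and t not in CORE_SUBJECTS and t != "anatomy"])
--
--     final_tags = []
--     is_anatomy = "anatomy" in tags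
--
--     if is_anatomy and systems:
--         for sys in systems:
--             final_tags.append(f"anatomy/body-system/{sys}")
--     elif is_anatomy:
--         final_tags.append("anatomy")
--         for sys in systems:
--             final_tags.append(sys)
--     else:
--         for sys in systems:
--             final_tags.append(sys)
--
--     final_tags.extend(core)
--     final_tags.extend(species)
--     final_tags.extend(others)
--
--     return final_tags
-- ===== SOURCE B (Python) =====
-- from typing import List, Set
--
-- BODY_SYSTEMS = {
--     "alimentary", "digestion", "digestive", "gi", "gastrointestinal",
--     "renal", "kidney", "urinary", "bladder",
--     "respiratory", "respiration",
--     "cardiovascular", "cardiology", "cardiac",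
--     "endocrine", "hormones",
--     "neurology", "neuroscience", "nervous",
--     "reproduction", "embryology", "reproductive",
--     "musculoskeletal", "orthopaedics", "orthopaedic", "skeletal", "muscular",
--     "haematology", "blood",
--     "microbiology", "microbes",
--     "integumentary", "skin",
--     "sensory", "eyes", "ears",
-- }
--
-- SPECIES = {
--     "canine", "dog", "dogs",
--     "feline", "cat", "cats",
--     "equine", "horse", "horses",
--     "bovine", "cow", "cattle",
--     "ovine", "sheep",
--     "porcine", "pig",
--     "rabbit", "lagomorph",
--     "reptile", "snake", "lizard", "tortoise",
--     "avian", "bird", "birds",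
--     "exotics", "smallies",
-- }
--
-- CORE_SUBJECTS = {
--     "anatomy", "physiology", "pathology", "pharmacology",
--     "clinical", "theory", "surgery", "anaesthesia",
--     "nursing", "emergency", "diagnostics",
-- }
--
-- def transform_tags(tags: Set[str]) -> List[str]:
--     """Single pass: dispatch each tag into one of four buckets (anatomy is only
--     a flag), then sort each bucket and assemble the hierarchical result."""
--     systems, species, core, others = [], [], [], []
--     is_anatomy = False
--     for t in tags:
--         if t == "anatomy":
--             is_anatomy = True
--         elif t in BODY_SYSTEMS:
--             systems.append(t)
--         elif t in SPECIES:
--             species.append(t)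
--         elif t in CORE_SUBJECTS:
--             core.append(t)
--         else:
--             others.append(t)
--     systems.sort()
--     species.sort()
--     core.sort()
--     others.sort()
--
--     if is_anatomy and systems:
--         final_tags = [f"anatomy/body-system/{s}" for s in systems]
--     elif is_anatomy:
--         final_tags = ["anatomy"] + systems
--     else:
--         final_tags = list(systems)
--     return final_tags + core + species + others
-- ===== Notes on version B (the rewrite author's own statement) =====
-- stated objective: alternative
-- what changed: Replaces A's four separate filtering comprehensions (four passes over tags plus a fourth pass re-testing all three sets) by a single bucketizing pass that dispatches each tag into one of four lists via if/elif (anatomy tracked as a flag), then sorts each bucket and assembles the same hierarchical result.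
import Mathlib
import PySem

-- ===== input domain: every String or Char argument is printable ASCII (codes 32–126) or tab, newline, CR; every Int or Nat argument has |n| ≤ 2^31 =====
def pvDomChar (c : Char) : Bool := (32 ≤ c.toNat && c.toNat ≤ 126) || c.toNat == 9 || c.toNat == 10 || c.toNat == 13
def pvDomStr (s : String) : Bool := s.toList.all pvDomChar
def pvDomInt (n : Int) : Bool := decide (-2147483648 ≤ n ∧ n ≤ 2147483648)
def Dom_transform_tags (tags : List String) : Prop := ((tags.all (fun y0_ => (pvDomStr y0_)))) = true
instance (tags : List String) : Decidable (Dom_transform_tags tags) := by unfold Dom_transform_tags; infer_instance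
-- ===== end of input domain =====

-- B replaces A's four filtering comprehensions by one bucketizing pass over the tags, then sorts the four buckets (objective: alternative decomposition).

-- ===== PORT A =====
def pvBodySystems : List String :=
  ["alimentary", "digestion", "digestive", "gi", "gastrointestinal",
   "renal", "kidney", "urinary", "bladder",
   "respiratory", "respiration",
   "cardiovascular", "cardiology", "cardiac",
   "endocrine", "hormones",
   "neurology", "neuroscience", "nervous",
   "reproduction", "embryology", "reproductive",
   "musculoskeletal", "orthopaedics", "orthopaedic", "skeletal", "muscular",
   "haematology", "blood",
   "microbiology", "microbes",
   "integumentary", "skin",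
   "sensory", "eyes", "ears"]

def pvSpecies : List String :=
  ["canine", "dog", "dogs",
   "feline", "cat", "cats",
   "equine", "horse", "horses",
   "bovine", "cow", "cattle",
   "ovine", "sheep",
   "porcine", "pig",
   "rabbit", "lagomorph",
   "reptile", "snake", "lizard", "tortoise",
   "avian", "bird", "birds",
   "exotics", "smallies"]

def pvCoreSubjects : List String :=
  ["anatomy", "physiology", "pathology", "pharmacology",
   "clinical", "theory", "surgery", "anaesthesia",
   "nursing", "emergency", "diagnostics"]

def transform_tags (tags : List String) : List String :=
  let systems := PySem.List.sorted (tags.filter (fun t => pvBodySystems.contains t)) (fun x => x) false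
  let species := PySem.List.sorted (tags.filter (fun t => pvSpecies.contains t)) (fun x => x) false
  let core := PySem.List.sorted (tags.filter (fun t => pvCoreSubjects.contains t && !(t == "anatomy"))) (fun x => x) false
  let others := PySem.List.sorted (tags.filter (fun t =>
      !pvBodySystems.contains t && !pvSpecies.contains t && !pvCoreSubjects.contains t && !(t == "anatomy"))) (fun x => x) false
  let isAnatomy := tags.contains "anatomy"
  let finalTags : List String :=
    if isAnatomy && !systems.isEmpty then
      systems.foldl (fun acc s => acc ++ ["anatomy/body-system/" ++ s]) []
    else if isAnatomy then
      systems.foldl (fun acc s => acc ++ [s]) ["anatomy"]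
    else
      systems.foldl (fun acc s => acc ++ [s]) []
  finalTags ++ core ++ species ++ others

-- ===== PORT B =====
def pvStep (st : List String × List String × List String × List String × Bool) (t : String) :
    List String × List String × List String × List String × Bool :=
  let (sys, spc, cor, oth, anat) := st
  if t == "anatomy" then (sys, spc, cor, oth, true)
  else if pvBodySystems.contains t then (sys ++ [t], spc, cor, oth, anat)
  else if pvSpecies.contains t then (sys, spc ++ [t], cor, oth, anat)
  else if pvCoreSubjects.contains t then (sys, spc, cor ++ [t], oth, anat)
  else (sys, spc, cor, oth ++ [t], anat)

def transform_tags_alt (tags : List String) : List String :=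
  let (sys0, spc0, cor0, oth0, isAnatomy) := tags.foldl pvStep ([], [], [], [], false)
  let systems := PySem.List.sorted sys0 (fun x => x) false
  let species := PySem.List.sorted spc0 (fun x => x) false
  let core := PySem.List.sorted cor0 (fun x => x) false
  let others := PySem.List.sorted oth0 (fun x => x) false
  let finalTags : List String :=
    if isAnatomy && !systems.isEmpty then
      systems.map (fun s => "anatomy/body-system/" ++ s)
    else if isAnatomy then
      ["anatomy"] ++ systems
    else
      systems
  finalTags ++ core ++ species ++ others

-- ===== PRECONDITION & SPEC =====
def Spec_transform_tags (tags : List String) (out : List String) : Prop := out = transform_tags_alt tags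
instance (tags : List String) (out : List String) : Decidable (Spec_transform_tags tags out) := by unfold Spec_transform_tags; infer_instance

-- ===== CLAIM (what is proved, stated in full; the proofs are below) =====
def Claim_equal_transform_tags : Prop := ∀ (tags : List String), Dom_transform_tags tags → Spec_transform_tags tags (transform_tags tags)

-- ===== LEMMAS AND PROOFS =====

theorem pvFlattenSingleton (l : List String) (g : String → String) :
    (List.map (fun x => [g x]) l).flatten = l.map g := by
  induction l with
  | nil => rfl
  | cons a t ih => simp [ih]

-- B's classification predicates (what the single pass puts in each bucket)
def pvQ1 (t : String) : Bool := !(t == "anatomy") && pvBodySystems.contains t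
def pvQ2 (t : String) : Bool := !(t == "anatomy") && !pvBodySystems.contains t && pvSpecies.contains t
def pvQ3 (t : String) : Bool := !(t == "anatomy") && !pvBodySystems.contains t && !pvSpecies.contains t && pvCoreSubjects.contains t
def pvQ4 (t : String) : Bool := !(t == "anatomy") && !pvBodySystems.contains t && !pvSpecies.contains t && !pvCoreSubjects.contains t

theorem pvFold_spec (tags : List String) (s p c o : List String) (fl : Bool) :
    tags.foldl pvStep (s, p, c, o, fl) =
      (s ++ tags.filter pvQ1, p ++ tags.filter pvQ2, c ++ tags.filter pvQ3,
       o ++ tags.filter pvQ4, fl || tags.contains "anatomy") := by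
  induction tags generalizing s p c o fl with
  | nil => simp
  | cons t ts ih =>
    simp only [List.foldl_cons, List.filter_cons, List.contains_cons]
    by_cases h1 : t = "anatomy"
    · subst h1
      simp [pvStep, ih, pvQ1, pvQ2, pvQ3, pvQ4]
    · have h1' : (t == "anatomy") = false := by simp [h1]
      have h1'' : ("anatomy" == t) = false := by simp [Ne.symm h1]
      by_cases h2 : t ∈ pvBodySystems
      · simp [pvStep, h1', h1'', h2, ih, pvQ1, pvQ2, pvQ3, pvQ4]
      · by_cases h3 : t ∈ pvSpecies
        · simp [pvStep, h1', h1'', h2, h3, ih, pvQ1, pvQ2, pvQ3, pvQ4]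
        · by_cases h4 : t ∈ pvCoreSubjects
          · simp [pvStep, h1', h1'', h2, h3, h4, ih, pvQ1, pvQ2, pvQ3, pvQ4]
          · simp [pvStep, h1', h1'', h2, h3, h4, ih, pvQ1, pvQ2, pvQ3, pvQ4]

theorem pvBody_not_anatomy (t : String) (h : t ∈ pvBodySystems) :
    t ≠ "anatomy" := by
  simp only [pvBodySystems] at h
  fin_cases h <;> decide

theorem pvSpec_disj (t : String) (h : t ∈ pvSpecies) :
    t ≠ "anatomy" ∧ t ∉ pvBodySystems := by
  simp only [pvSpecies] at h
  fin_cases h <;> exact ⟨by decide, by decide⟩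

theorem pvCore_disj (t : String) (h : t ∈ pvCoreSubjects) (hne : t ≠ "anatomy") :
    t ∉ pvBodySystems ∧ t ∉ pvSpecies := by
  simp only [pvCoreSubjects] at h
  fin_cases h <;> first
    | exact absurd rfl hne
    | exact ⟨by decide, by decide⟩

theorem pvQ1_eq (t : String) : pvQ1 t = pvBodySystems.contains t := by
  by_cases hb : t ∈ pvBodySystems
  · simp [pvQ1, hb, pvBody_not_anatomy t hb]
  · simp [pvQ1, hb]

theorem pvQ2_eq (t : String) : pvQ2 t = pvSpecies.contains t := by
  by_cases hs : t ∈ pvSpecies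
  · obtain ⟨ha, hb⟩ := pvSpec_disj t hs
    simp [pvQ2, hs, ha, hb]
  · simp [pvQ2, hs]

theorem pvQ3_eq (t : String) : pvQ3 t = (pvCoreSubjects.contains t && !(t == "anatomy")) := by
  by_cases ha : t = "anatomy"
  · subst ha; simp [pvQ3]
  · by_cases hc : t ∈ pvCoreSubjects
    · obtain ⟨hb, hs⟩ := pvCore_disj t hc ha
      simp [pvQ3, hc, hb, hs]
    · simp [pvQ3, hc]

theorem pvQ4_eq (t : String) :
    pvQ4 t = (!pvBodySystems.contains t && !pvSpecies.contains t && !pvCoreSubjects.contains t && !(t == "anatomy")) := by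
  by_cases ha : t = "anatomy"
  · subst ha; simp [pvQ4]
  · simp only [pvQ4]
    cases hb : pvBodySystems.contains t <;> cases hs : pvSpecies.contains t <;>
      cases hc : pvCoreSubjects.contains t <;> simp_all

-- ===== VERDICT (by name: the statement is the Claim_ definition above) =====
theorem transform_tags_spec : Claim_equal_transform_tags := by
  intro tags _
  unfold Spec_transform_tags transform_tags transform_tags_alt
  rw [pvFold_spec]
  simp only [List.nil_append, Bool.false_or]
  have h1 : tags.filter pvQ1 = tags.filter (fun t => pvBodySystems.contains t) := by
    exact List.filter_congr (fun x _ => by rw [pvQ1_eq])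
  have h2 : tags.filter pvQ2 = tags.filter (fun t => pvSpecies.contains t) := by
    exact List.filter_congr (fun x _ => by rw [pvQ2_eq])
  have h3 : tags.filter pvQ3 = tags.filter (fun t => pvCoreSubjects.contains t && !(t == "anatomy")) := by
    exact List.filter_congr (fun x _ => by rw [pvQ3_eq])
  have h4 : tags.filter pvQ4 = tags.filter (fun t =>
      !pvBodySystems.contains t && !pvSpecies.contains t && !pvCoreSubjects.contains t && !(t == "anatomy")) := by
    exact List.filter_congr (fun x _ => by rw [pvQ4_eq])
  rw [h1, h2, h3, h4]
  simp [pvFlattenSingleton]
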